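-- pv_equiv track=rewrite | github.com/yassine-bouassida/DataTrainingRepo | Week2/Examples/CodingChallenges/count_domain_names.py | count_domains
-- ===== SOURCE A (Python) =====
-- def count_domains(domains: str, min_hits: int = 0) -> str:
--     from collections import defaultdict
--
--     def normalize(domain: str) -> str:
--         domain = domain.lstrip("*.")   # remove leading "*."
--         parts = domain.split(".")
--
--         # Handle .co.xx and .com.xx
--         if len(parts) >= 3 and parts[-2] in ("co", "com"):
--             return ".".join(parts[-3:])
--         else:
--             return ".".join(parts[-2:])
--
--     totals = defaultdict(int)
--
--     for line in domains.splitlines():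
--         if not line.strip():
--             continue
--         domain, hits = line.split()
--         totals[normalize(domain)] += int(hits)
--
--     # Filter and sort
--     results = [
--         (domain, hits)
--         for domain, hits in totals.items()
--         if hits >= min_hits
--     ]
--
--     results.sort(key=lambda x: (-x[1], x[0]))
--
--     return "\n".join(f"{domain} ({hits})" for domain, hits in results)
-- ===== SOURCE B (Python) =====
-- def count_domains(domains: str, min_hits: int = 0) -> str:
--     def normalize(domain: str) -> str:
--         domain = domain.lstrip("*.")   # remove leading "*."
--         parts = domain.split(".")
--         # keep 3 labels for .co.xx / .com.xx, else 2
--         keep = 3 if len(parts) >= 3 and parts[-2] in ("co", "com") else 2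
--         return ".".join(parts[-keep:])
--
--     # Stage 1: parse every non-blank line into a (normalized domain, hits) pair.
--     pairs = []
--     for line in domains.splitlines():
--         if line.strip():
--             d, h = line.split()
--             pairs.append((normalize(d), int(h)))
--
--     # Stage 2: distinct domains in first-seen order (no hash aggregation).
--     seen = []
--     for d, _ in pairs:
--         if d not in seen:
--             seen.append(d)
--
--     # Stage 3: for each distinct domain, sum its hits by rescanning the pairs.
--     results = []
--     for d in seen:
--         total = sum(h for x, h in pairs if x == d)
--         if total >= min_hits:
--             results.append((d, total))
--
--     results = sorted(results, key=lambda t: (-t[1], t[0]))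
--     return "\n".join(f"{d} ({h})" for d, h in results)
-- ===== Notes on version B (the rewrite author's own statement) =====
-- stated objective: alternative
-- what changed: Replaces the defaultdict hash aggregation with staged list passes: parse all (domain, hits) pairs, collect the distinct domains in first-seen order by list membership, then for each distinct domain sum its hits by rescanning the pair list; filter during that scan and sort once with a tuple key.
import Mathlib
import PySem

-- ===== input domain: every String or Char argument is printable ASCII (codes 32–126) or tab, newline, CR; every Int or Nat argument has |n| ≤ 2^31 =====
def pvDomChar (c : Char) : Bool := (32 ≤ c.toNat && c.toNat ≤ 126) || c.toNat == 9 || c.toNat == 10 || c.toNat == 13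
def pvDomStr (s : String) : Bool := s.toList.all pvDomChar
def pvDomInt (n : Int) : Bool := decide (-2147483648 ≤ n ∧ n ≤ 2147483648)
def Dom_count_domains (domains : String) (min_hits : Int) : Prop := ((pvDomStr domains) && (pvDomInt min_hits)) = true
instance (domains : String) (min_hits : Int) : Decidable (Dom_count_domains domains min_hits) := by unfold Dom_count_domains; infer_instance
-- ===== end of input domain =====

-- B replaces A's defaultdict hash aggregation by staged list passes (dedup keys in first-seen order, per-key rescan sums); same output, different shape (alternative, not faster).


-- ===== PORT A =====
-- lstrip("*.") is ported by hand as dropWhile over the char set {'*','.'} — exact Python semantics of str.lstrip(chars).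
def pvNormalize (d : String) : String :=
  let cs := d.toList.dropWhile (fun c => c == '*' || c == '.')
  let parts := PySem.Chars.splitOn cs ['.']
  if 3 ≤ parts.length && (PySem.List.pyGetD parts (-2) [] == ['c','o'] || PySem.List.pyGetD parts (-2) [] == ['c','o','m'])
  then String.mk (PySem.Chars.join ['.'] (PySem.List.slice parts (some (-3)) none))
  else String.mk (PySem.Chars.join ['.'] (PySem.List.slice parts (some (-2)) none))

-- "domain, hits = line.split(); totals[normalize(domain)] += int(hits)" — the per-line parse;
-- the pyGetD/getD defaults are only reached where Python raises (excluded by Pre_).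
def pvParseLine (line : String) : String × Int :=
  let ws := PySem.Str.split₀ line
  (pvNormalize (PySem.List.pyGetD ws 0 ""), (PySem.Int.ofStr? (PySem.List.pyGetD ws 1 "")).getD 0)

-- f"{domain} ({hits})"
def pvFmt (p : String × Int) : String := p.1 ++ " (" ++ PySem.Int.toStr p.2 ++ ")"

def count_domains (domains : String) (min_hits : Int) : String :=
  let totals := (PySem.Str.splitlines domains).foldl
    (fun d line => if PySem.Str.strip line == "" then d
      else d.modify (pvParseLine line).1 0 (· + (pvParseLine line).2)) PySem.Dict.empty
  let results := totals.items.filter (fun p => min_hits ≤ p.2)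
  let results := PySem.List.sorted2 results (fun x => -x.2) (fun x => x.1) false
  PySem.Str.join "\n" (results.map pvFmt)

-- ===== PORT B =====
-- B's normalize: one join over parts[-keep:] with keep = 3 or 2.
def pvNormB (d : String) : String :=
  let cs := d.toList.dropWhile (fun c => c == '*' || c == '.')
  let parts := PySem.Chars.splitOn cs ['.']
  let keep : Int := if 3 ≤ parts.length && (PySem.List.pyGetD parts (-2) [] == ['c','o'] || PySem.List.pyGetD parts (-2) [] == ['c','o','m']) then 3 else 2
  String.mk (PySem.Chars.join ['.'] (PySem.List.slice parts (some (-keep)) none))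

def count_domains_alt (domains : String) (min_hits : Int) : String :=
  -- stage 1: parse the non-blank lines into (domain, hits) pairs
  let pairs := (PySem.Str.splitlines domains).foldl
    (fun acc line => if !(PySem.Str.strip line == "")
      then acc ++ [(pvNormB (PySem.List.pyGetD (PySem.Str.split₀ line) 0 ""),
                    (PySem.Int.ofStr? (PySem.List.pyGetD (PySem.Str.split₀ line) 1 "")).getD 0)]
      else acc) []
  -- stage 2: distinct domains, first-seen order ("if d not in seen: seen.append(d)")
  let seen := pairs.foldl (fun s p => if s.contains p.1 then s else s ++ [p.1]) []
  -- stage 3: per-domain total by rescanning pairs; filter while building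
  let results := seen.foldl (fun r d =>
    if min_hits ≤ ((pairs.filter (fun p => p.1 == d)).map (·.2)).sum
    then r ++ [(d, ((pairs.filter (fun p => p.1 == d)).map (·.2)).sum)] else r) []
  -- sorted(results, key=lambda t: (-t[1], t[0])) : Python tuple key = lexicographic
  let results := PySem.List.sorted results (fun t => toLex ((-t.2 : Int), t.1)) false
  PySem.Str.join "\n" (results.map (fun p => p.1 ++ " (" ++ PySem.Int.toStr p.2 ++ ")"))

-- ===== PRECONDITION & SPEC =====
-- Pre_ excludes exactly the inputs where A raises ValueError: a non-blank line that does not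
-- split into exactly two whitespace-separated tokens, or whose second token is not int-parsable.
def Pre_count_domains (domains : String) (min_hits : Int) : Prop :=
  ((PySem.Str.splitlines domains).all (fun l =>
    (PySem.Str.strip l == "") ||
    ((PySem.Str.split₀ l).length == 2 &&
     (PySem.Int.ofStr? (PySem.List.pyGetD (PySem.Str.split₀ l) 1 "")).isSome))) = true
instance (domains : String) (min_hits : Int) : Decidable (Pre_count_domains domains min_hits) := by
  unfold Pre_count_domains; infer_instance

def pvWitness_count_domains : String × Int := ("mail.google.com 3\n*.x.co.uk 5\n\ngoogle.com 2", 1)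

def Spec_count_domains (domains : String) (min_hits : Int) (out : String) : Prop := out = count_domains_alt domains min_hits
instance (domains : String) (min_hits : Int) (out : String) : Decidable (Spec_count_domains domains min_hits out) := by unfold Spec_count_domains; infer_instance

-- ===== CLAIM (what is proved, stated in full; the proofs are below) =====
def Claim_equal_count_domains : Prop := ∀ (domains : String) (min_hits : Int), Dom_count_domains domains min_hits → Pre_count_domains domains min_hits → Spec_count_domains domains min_hits (count_domains domains min_hits)

-- ===== LEMMAS AND PROOFS =====

-- B's keep-count normalize computes the same string as A's two-branch normalize
theorem pvNormB_eq : pvNormB = pvNormalize := by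
  funext d
  unfold pvNormB pvNormalize
  by_cases h : (3 ≤ (PySem.Chars.splitOn (d.toList.dropWhile (fun c => c == '*' || c == '.')) ['.']).length && (PySem.List.pyGetD (PySem.Chars.splitOn (d.toList.dropWhile (fun c => c == '*' || c == '.')) ['.']) (-2) [] == ['c','o'] || PySem.List.pyGetD (PySem.Chars.splitOn (d.toList.dropWhile (fun c => c == '*' || c == '.')) ['.']) (-2) [] == ['c','o','m'])) = true
  · simp only [h, if_pos]
  · simp only [h, Bool.false_eq_true, if_false]

theorem pv_foldl_dict_skip (lines : List String) (d : PySem.Dict String Int) :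
    lines.foldl (fun d line => if PySem.Str.strip line == "" then d
      else d.modify (pvParseLine line).1 0 (· + (pvParseLine line).2)) d
  = ((lines.filter (fun l => !(PySem.Str.strip l == ""))).map pvParseLine).foldl
      (fun d p => d.modify p.1 0 (· + p.2)) d := by
  induction lines generalizing d with
  | nil => rfl
  | cons l t ih =>
    by_cases h : PySem.Str.strip l = ""
    · simp [h]; simpa using ih d
    · simp [h]; simpa using ih _

theorem pv_getD_foldl_modify_sum (l : List (String × Int)) (d : PySem.Dict String Int) (k : String) :
    (l.foldl (fun d p => d.modify p.1 0 (· + p.2)) d).getD k 0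
  = d.getD k 0 + ((l.filter (fun q => q.1 == k)).map (·.2)).sum := by
  induction l generalizing d with
  | nil => simp
  | cons p t ih =>
    by_cases h : p.1 = k
    · simp only [List.foldl_cons, ih, PySem.Dict.getD_modify, h, List.filter_cons,
        beq_self_eq_true, if_pos, List.map_cons, List.sum_cons]
      ring
    · simp only [List.foldl_cons, ih, PySem.Dict.getD_modify, List.filter_cons]
      rw [if_neg (by exact fun hk => h hk.symm)]
      simp [h]

theorem pv_getD_sum (l : List (String × Int)) (k : String) :
    (l.foldl (fun d p => d.modify p.1 0 (· + p.2)) PySem.Dict.empty).getD k 0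
  = ((l.filter (fun q => q.1 == k)).map (·.2)).sum := by
  rw [pv_getD_foldl_modify_sum]
  simp [PySem.Dict.empty, PySem.Dict.getD, PySem.Dict.get?]

-- Python's stable two-key sort equals the one-key sort by the lexicographic pair
theorem pv_sorted2_eq_sorted_toLex {α : Type} (xs : List α) (k1 : α → Int) (k2 : α → String) :
    PySem.List.sorted2 xs k1 k2 false = PySem.List.sorted xs (fun x => toLex (k1 x, k2 x)) false := by
  rw [PySem.List.sorted_eq_foldl_insertBy]
  unfold PySem.List.sorted2
  simp only [if_neg (by decide : ¬ (false = true))]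
  have hb : (fun a b => decide (k1 a < k1 b) || (!decide (k1 b < k1 a) && decide (k2 a < k2 b)))
      = (fun a b => decide ((fun x => toLex (k1 x, k2 x)) a < (fun x => toLex (k1 x, k2 x)) b)) := by
    funext a b
    simp only [Prod.Lex.lt_iff]
    rcases lt_trichotomy (k1 a) (k1 b) with h | h | h
    · simp [h, not_lt.mpr (le_of_lt h)]
    · simp [h]
    · simp [h, ne_of_gt h]
  rw [hb]

-- A's aggregated dict items ARE B's (seen key, rescanned total) list, in the same order
theorem pv_items_eq (L : List (String × Int)) :
    (L.foldl (fun d p => d.modify p.1 0 (· + p.2)) PySem.Dict.empty).items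
  = (L.foldl (fun s p => if s.contains p.1 then s else s ++ [p.1]) []).map
      (fun k => (k, ((L.filter (fun q => q.1 == k)).map (·.2)).sum)) := by
  set D := L.foldl (fun d p => d.modify p.1 0 (· + p.2)) PySem.Dict.empty with hD
  have hnodup : D.keys.Nodup := by
    apply PySem.Dict.nodup_keys_foldl_modify_key L Prod.fst 0 (fun _ p => (· + p.2))
    simp [PySem.Dict.empty, PySem.Dict.keys]
  have hkeys : D.keys = L.foldl (fun s p => if s.contains p.1 then s else s ++ [p.1]) [] := by
    rw [hD, PySem.Dict.keys_foldl_modify_key L Prod.fst 0 (fun _ p => (· + p.2))]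
    show PySem.Set.update _ _ = _
    rw [PySem.Set.update]
    have : (PySem.Dict.empty : PySem.Dict String Int).keys = ([] : List String) := by
      simp [PySem.Dict.empty, PySem.Dict.keys]
    rw [this, List.foldl_map]
    rfl
  rw [PySem.Dict.items_eq_map_keys D hnodup 0, hkeys]
  apply List.map_congr_left
  intro k _
  rw [hD, pv_getD_sum]

-- the filter-while-building foldl of B's stage 3
theorem pv_stage3 (seen : List String) (q : String → Int) (m : Int) :
    seen.foldl (fun r d => if m ≤ q d then r ++ [(d, q d)] else r) []
  = ((seen.map (fun k => (k, q k))).filter (fun p => m ≤ p.2)) := by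
  rw [List.filter_map]
  induction seen using List.reverseRecOn with
  | nil => rfl
  | append_singleton t x ih =>
    rw [List.foldl_append, List.filter_append, List.map_append, ih]
    by_cases h : m ≤ q x <;> simp [h]

-- ===== VERDICT (by name: the statement is the Claim_ definition above) =====
theorem count_domains_spec : Claim_equal_count_domains := by
  intro domains min_hits _hDom _hPre
  unfold Spec_count_domains count_domains count_domains_alt
  simp only [pvNormB_eq]
  rw [pv_foldl_dict_skip, PySem.List.foldl_append_if]
  simp only [List.nil_append]
  set L := ((PySem.Str.splitlines domains).filter (fun l => !(PySem.Str.strip l == ""))).map pvParseLine with hL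
  have hmapL : ((PySem.Str.splitlines domains).filter (fun l => !(PySem.Str.strip l == ""))).map
      (fun line => (pvNormalize (PySem.List.pyGetD (PySem.Str.split₀ line) 0 ""),
        (PySem.Int.ofStr? (PySem.List.pyGetD (PySem.Str.split₀ line) 1 "")).getD 0)) = L := by
    rw [hL]; rfl
  rw [hmapL]
  rw [pv_items_eq, pv_stage3, pv_sorted2_eq_sorted_toLex]
  rfl
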